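-- pv_equiv track=rewrite | github.com/bcdoherty/Project1 | test.py | classSizes
-- ===== SOURCE A (Python) =====
-- import operator
--
-- def classSizes(data):
-- # Create a histogram
-- # Input: list of dictionaries
-- # Output: Return a list of tuples sorted by the number of students in that class in
-- # descending order
-- 	lst = []
-- 	sr = 0
-- 	jr = 0
-- 	so = 0
-- 	fr = 0
-- 	for x in range(len(data)):
-- 		dic = data[x]
-- 		year = dic['class']
-- 		if year == 'Senior':
-- 			sr = 1 + sr
-- 		elif year == 'Junior':
-- 			jr = 1 + jr
-- 		elif year == "Sophomore":
-- 			so = 1 + so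
-- 		else:
-- 			fr = 1 + fr
-- 	#make tuples
-- 	srCount = ("Senior", sr)
-- 	jrCount = ("Junior", jr)
-- 	soCount = ("Sophomore", so)
-- 	frCount = ("Freshman", fr)
--
-- 	lst.append(srCount)
-- 	lst.append(jrCount)
-- 	lst.append(soCount)
-- 	lst.append(frCount)
--
-- 	lst.sort(key = operator.itemgetter(1), reverse=True)
-- 	return lst
-- ===== SOURCE B (Python) =====
-- import operator
--
-- def classSizes(data):
--     # Project out the class years once, count the three named years with
--     # list.count, and get Freshman as the complement (everything else).
--     years = [d['class'] for d in data]
--     lst = [(name, years.count(name)) for name in ("Senior", "Junior", "Sophomore")]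
--     lst.append(("Freshman", len(years) - sum(c for _, c in lst)))
--     lst.sort(key=operator.itemgetter(1), reverse=True)
--     return lst
-- ===== Notes on version B (the rewrite author's own statement) =====
-- stated objective: simpler
-- what changed: Replaces the four-accumulator branching index loop with a single projection of the class years plus list.count per named year, computing Freshman as the complement of the three counts.
import Mathlib
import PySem

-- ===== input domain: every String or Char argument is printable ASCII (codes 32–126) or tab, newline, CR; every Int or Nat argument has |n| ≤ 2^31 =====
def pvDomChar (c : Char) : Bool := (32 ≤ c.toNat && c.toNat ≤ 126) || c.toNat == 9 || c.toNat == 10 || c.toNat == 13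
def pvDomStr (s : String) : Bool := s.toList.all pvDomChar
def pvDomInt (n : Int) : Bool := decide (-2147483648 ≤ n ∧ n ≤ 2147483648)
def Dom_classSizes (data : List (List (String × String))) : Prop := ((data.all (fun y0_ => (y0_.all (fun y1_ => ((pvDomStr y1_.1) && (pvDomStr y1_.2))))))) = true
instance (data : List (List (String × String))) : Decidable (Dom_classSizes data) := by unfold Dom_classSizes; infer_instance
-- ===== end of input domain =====

-- B replaces A's four-accumulator branching loop by a projection of the years,
-- list.count for the three named years and a complement for Freshman (objective: simpler).

-- ===== PORT A =====
-- dic['class'] (first match in the association list; Pre_ guarantees the key is present)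
def pvYear (dic : List (String × String)) : String :=
  (List.lookup "class" dic).getD ""

-- one iteration of A's loop body (the if/elif chain updating sr, jr, so, fr)
def pvStep (acc : Int × Int × Int × Int) (dic : List (String × String)) : Int × Int × Int × Int :=
  let year := pvYear dic
  if year = "Senior" then (1 + acc.1, acc.2.1, acc.2.2.1, acc.2.2.2)
  else if year = "Junior" then (acc.1, 1 + acc.2.1, acc.2.2.1, acc.2.2.2)
  else if year = "Sophomore" then (acc.1, acc.2.1, 1 + acc.2.2.1, acc.2.2.2)
  else (acc.1, acc.2.1, acc.2.2.1, 1 + acc.2.2.2)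

def classSizes (data : List (List (String × String))) : List (String × Int) :=
  let st :=
    (PySem.List.pyRange 0 (data.length : Int) 1).foldl
      (fun (acc : Int × Int × Int × Int) x => pvStep acc (PySem.List.pyGetD data x []))
      (0, 0, 0, 0)
  let lst := [("Senior", st.1), ("Junior", st.2.1), ("Sophomore", st.2.2.1), ("Freshman", st.2.2.2)]
  PySem.List.sorted lst (fun p => p.2) true

-- ===== PORT B =====
def classSizes_alt (data : List (List (String × String))) : List (String × Int) :=
  let years := data.map pvYear
  let lst := ["Senior", "Junior", "Sophomore"].map (fun name => (name, (years.count name : Int)))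
  let lst := lst ++ [("Freshman", (years.length : Int) - (lst.map (fun p => p.2)).sum)]
  PySem.List.sorted lst (fun p => p.2) true

-- ===== PRECONDITION & SPEC =====
-- Pre_ excludes inputs where some record lacks the key 'class': Python A (and B) raise KeyError there.
def Pre_classSizes (data : List (List (String × String))) : Prop :=
  (data.all (fun dic => (List.lookup "class" dic).isSome)) = true
instance (data : List (List (String × String))) : Decidable (Pre_classSizes data) := by
  unfold Pre_classSizes; infer_instance
def pvWitness_classSizes : (List (List (String × String))) :=
  [[("class", "Senior")], [("class", "art")]]

def Spec_classSizes (data : List (List (String × String))) (out : List (String × Int)) : Prop := out = classSizes_alt data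
instance (data : List (List (String × String))) (out : List (String × Int)) : Decidable (Spec_classSizes data out) := by unfold Spec_classSizes; infer_instance

-- ===== CLAIM (what is proved, stated in full; the proofs are below) =====
def Claim_equal_classSizes : Prop := ∀ (data : List (List (String × String))), Dom_classSizes data → Pre_classSizes data → Spec_classSizes data (classSizes data)

-- ===== LEMMAS AND PROOFS =====

-- A's accumulator fold computes the three counts and (for Freshman) the complement.
theorem pv_fold_counts (data : List (List (String × String))) (s j o f : Int) :
    data.foldl pvStep (s, j, o, f)
    = (s + ((data.map pvYear).count "Senior" : Int),
       j + ((data.map pvYear).count "Junior" : Int),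
       o + ((data.map pvYear).count "Sophomore" : Int),
       f + ((data.length : Int) - ((data.map pvYear).count "Senior" : Int)
              - ((data.map pvYear).count "Junior" : Int)
              - ((data.map pvYear).count "Sophomore" : Int))) := by
  induction data generalizing s j o f with
  | nil => simp
  | cons d t ih =>
    simp only [List.foldl_cons, List.map_cons, List.length_cons]
    by_cases hs : pvYear d = "Senior"
    · simp [pvStep, hs, ih]; omega
    · by_cases hj : pvYear d = "Junior"
      · simp [pvStep, hj, ih]; omega
      · by_cases ho : pvYear d = "Sophomore"
        · simp [pvStep, ho, ih]; omega
        · simp [pvStep, hs, hj, ho, ih]; omega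

-- ===== VERDICT (by name: the statement is the Claim_ definition above) =====
theorem classSizes_spec : Claim_equal_classSizes := by
  intro data _ _
  show classSizes data = classSizes_alt data
  unfold classSizes classSizes_alt
  rw [PySem.List.foldl_pyRange_zero_pyGetD' data [] pvStep (0, 0, 0, 0), pv_fold_counts]
  simp
  ring_nf
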